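-- pv_equiv track=rewrite | github.com/willwhitney/TD3 | unified_runner.py | construct_jobs
-- ===== SOURCE A (Python) =====
-- import itertools
--
-- def construct_jobs(grids):
--     jobs = []
--     for grid in grids:
--         individual_options = [[{key: value} for value in values]
--                               for key, values in grid.items()]
--         product_options = list(itertools.product(*individual_options))
--         jobs += [{k: v for d in option_set for k, v in d.items()}
--                  for option_set in product_options]
--     return jobs
-- ===== SOURCE B (Python) =====
-- def construct_jobs(grids):
--     jobs = []
--     for grid in grids:
--         items = list(grid.items())
--         strides = []
--         total = 1
--         for _, values in reversed(items):
--             strides.append(total)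
--             total *= len(values)
--         strides.reverse()
--         for i in range(total):
--             jobs.append({key: values[(i // stride) % len(values)]
--                          for (key, values), stride in zip(items, strides)})
--     return jobs
-- ===== Notes on version B (the rewrite author's own statement) =====
-- stated objective: alternative
-- what changed: Replaced itertools.product over per-key lists of singleton dicts and dict merging by mixed-radix index decoding: compute a stride (product of later value-list lengths) per key once, then for each job index i in range(total) read each key's value directly as values[(i // stride) % len(values)], so no product of tuples and no per-job dict merging is done.
import Mathlib
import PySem

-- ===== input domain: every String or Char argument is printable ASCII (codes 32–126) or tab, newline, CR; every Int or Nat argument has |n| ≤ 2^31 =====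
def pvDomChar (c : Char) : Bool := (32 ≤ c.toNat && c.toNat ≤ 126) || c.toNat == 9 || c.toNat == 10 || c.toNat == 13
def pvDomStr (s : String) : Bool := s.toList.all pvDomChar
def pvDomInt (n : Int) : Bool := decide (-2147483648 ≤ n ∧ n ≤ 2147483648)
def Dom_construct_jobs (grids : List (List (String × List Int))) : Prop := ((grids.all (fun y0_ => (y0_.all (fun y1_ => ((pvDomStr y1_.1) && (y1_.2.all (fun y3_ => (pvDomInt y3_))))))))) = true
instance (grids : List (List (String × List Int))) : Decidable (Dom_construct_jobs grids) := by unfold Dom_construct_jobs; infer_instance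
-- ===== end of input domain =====

-- B replaces itertools.product over singleton dicts + per-job dict merging by mixed-radix index
-- decoding (per-key strides, values[(i // stride) % len(values)] for each job index i);
-- the equivalence proved here is about the return value only.

-- ===== PORT A =====
-- itertools.product(*lists): first list varies slowest
def pyProduct {α : Type} (ls : List (List α)) : List (List α) :=
  match ls with
  | [] => [[]]
  | xs :: rest => xs.flatMap (fun x => (pyProduct rest).map (fun t => x :: t))

def construct_jobs (grids : List (List (String × List Int))) : List (List (String × Int)) :=
  grids.foldl (fun jobs grid =>
    let individual_options := grid.map (fun kv => kv.2.map (fun v => PySem.Dict.ofList [(kv.1, v)]))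
    let product_options := pyProduct individual_options
    jobs ++ product_options.map (fun option_set =>
      (option_set.foldl (fun acc d =>
        d.items.foldl (fun acc2 p => acc2.insert p.1 p.2) acc) PySem.Dict.empty).items)) []

-- ===== PORT B =====
-- strides/total computed by the foldl over reversed items (strides.append(total); total *= len),
-- then strides.reverse(); values[(i // stride) % len(values)] is pyGetD — the index is always in
-- range since 0 ≤ i < total (shown in the proofs below)
def construct_jobs_alt (grids : List (List (String × List Int))) : List (List (String × Int)) :=
  grids.foldl (fun jobs grid =>
    let p := grid.reverse.foldl
      (fun (acc : List Int × Int) kv => (acc.1 ++ [acc.2], acc.2 * (kv.2.length : Int))) ([], 1)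
    let strides := p.1.reverse
    jobs ++ (PySem.List.pyRange 0 p.2 1).map (fun i =>
      (PySem.Dict.ofList ((grid.zip strides).map (fun x =>
        (x.1.1, PySem.List.pyGetD x.1.2
          (PySem.Int.mod (PySem.Int.floordiv i x.2) (x.1.2.length : Int)) 0)))).items)) []

-- ===== PRECONDITION & SPEC =====
-- Pre_ excludes association lists in which some grid carries duplicate keys: such a list does not
-- correspond to any Python dict (a dict literal collapses duplicates silently), so neither behaviour
-- on it is the one Python A exhibits.
def Pre_construct_jobs (grids : List (List (String × List Int))) : Prop :=
  ∀ grid ∈ grids, (grid.map Prod.fst).Nodup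
instance (grids : List (List (String × List Int))) : Decidable (Pre_construct_jobs grids) := by
  unfold Pre_construct_jobs; infer_instance

def pvWitness_construct_jobs : (List (List (String × List Int))) :=
  [[("a", [1, 2]), ("b", [3])]]

def Spec_construct_jobs (grids : List (List (String × List Int))) (out : List (List (String × Int))) : Prop := out = construct_jobs_alt grids
instance (grids : List (List (String × List Int))) (out : List (List (String × Int))) : Decidable (Spec_construct_jobs grids out) := by unfold Spec_construct_jobs; infer_instance

-- ===== CLAIM (what is proved, stated in full; the proofs are below) =====
def Claim_equal_construct_jobs : Prop := ∀ (grids : List (List (String × List Int))), Dom_construct_jobs grids → Pre_construct_jobs grids → Spec_construct_jobs grids (construct_jobs grids)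

-- ===== LEMMAS AND PROOFS =====

-- cart: the Cartesian product of the value lists, first key varying slowest
def cart : List (String × List Int) → List (List (String × Int))
  | [] => [[]]
  | kv :: rest => kv.2.flatMap (fun v => (cart rest).map (fun t => (kv.1, v) :: t))

-- total number of jobs of a grid
def tot (g : List (String × List Int)) : Nat := (g.map (fun kv => kv.2.length)).prod

-- per-key strides: product of the lengths of the later value lists
def stridesL : List (String × List Int) → List Int
  | [] => []
  | _ :: rest => ((tot rest : Nat) : Int) :: stridesL rest

-- the pair list B builds for job index i
def dpairs (g : List (String × List Int)) (ss : List Int) (i : Int) : List (String × Int) :=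
  (g.zip ss).map (fun x =>
    (x.1.1, PySem.List.pyGetD x.1.2
      (PySem.Int.mod (PySem.Int.floordiv i x.2) (x.1.2.length : Int)) 0))

theorem mem_cart_fst {grid : List (String × List Int)} {p : List (String × Int)}
    (hp : p ∈ cart grid) : p.map Prod.fst = grid.map Prod.fst := by
  induction grid generalizing p with
  | nil => simp [cart] at hp; simp [hp]
  | cons kv rest ih =>
    simp only [cart, List.mem_flatMap, List.mem_map] at hp
    obtain ⟨v, -, t, ht, rfl⟩ := hp
    simp [ih ht]

theorem ofList_items_of_nodup (pairs : List (String × Int))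
    (h : (pairs.map Prod.fst).Nodup) : (PySem.Dict.ofList pairs).items = pairs := by
  have := PySem.Dict.items_foldl_insert_fresh pairs Prod.fst Prod.snd (PySem.Dict.empty)
    (by intro a _; exact PySem.Dict.contains_empty _) h
  simpa [PySem.Dict.ofList] using this

-- A's product of singleton-dict option lists, characterised by cart
theorem pyProduct_map_cart (grid : List (String × List Int)) :
    pyProduct (grid.map (fun kv => kv.2.map (fun v => PySem.Dict.ofList [(kv.1, v)])))
      = (cart grid).map (fun pairs => pairs.map (fun p => PySem.Dict.ofList [p])) := by
  induction grid with
  | nil => rfl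
  | cons kv rest ih =>
    simp only [List.map_cons, pyProduct, ih, cart]
    simp [List.flatMap_map, List.map_flatMap, List.map_map, Function.comp_def]

-- merging a list of singleton dicts is folding the pairs in
theorem merge_singletons (pairs : List (String × Int)) (acc0 : PySem.Dict String Int) :
    (pairs.map (fun p => PySem.Dict.ofList [p])).foldl
        (fun acc d => d.items.foldl (fun acc2 p => acc2.insert p.1 p.2) acc) acc0
      = pairs.foldl (fun a p => a.insert p.1 p.2) acc0 := by
  induction pairs generalizing acc0 with
  | nil => rfl
  | cons p rest ih => simpa using ih _

theorem merged_items (pairs : List (String × Int)) (h : (pairs.map Prod.fst).Nodup) :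
    ((pairs.map (fun p => PySem.Dict.ofList [p])).foldl
        (fun acc d => d.items.foldl (fun acc2 p => acc2.insert p.1 p.2) acc)
        PySem.Dict.empty).items = pairs := by
  rw [merge_singletons]
  exact ofList_items_of_nodup pairs h

-- per-grid: A's body equals cart
theorem a_grid_eq_cart (grid : List (String × List Int)) (h : (grid.map Prod.fst).Nodup) :
    (pyProduct (grid.map (fun kv => kv.2.map (fun v => PySem.Dict.ofList [(kv.1, v)])))).map
        (fun option_set => (option_set.foldl (fun acc d =>
          d.items.foldl (fun acc2 p => acc2.insert p.1 p.2) acc) PySem.Dict.empty).items)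
      = cart grid := by
  rw [pyProduct_map_cart, List.map_map]
  conv_rhs => rw [← List.map_id (cart grid)]
  refine List.map_congr_left ?_
  intro pairs hp
  simpa using merged_items pairs (by rw [mem_cart_fst hp]; exact h)

-- ---- B side ----

-- the reverse fold of B computes (reversed strides, total)
theorem stride_fold (g : List (String × List Int)) :
    g.reverse.foldl
        (fun (acc : List Int × Int) kv => (acc.1 ++ [acc.2], acc.2 * (kv.2.length : Int))) ([], 1)
      = ((stridesL g).reverse, ((tot g : Nat) : Int)) := by
  rw [List.foldl_reverse]
  induction g with
  | nil => simp [stridesL, tot]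
  | cons kv rest ih =>
    simp only [List.foldr_cons, ih, stridesL, tot, List.map_cons, List.prod_cons, List.reverse_cons]
    push_cast
    rw [Int.mul_comm]

theorem div_mod_shift (q n T r : Nat) : (q * (n * T) + r) / T % n = r / T % n := by
  rcases Nat.eq_zero_or_pos T with hT | hT
  · subst hT; simp
  · rw [show q * (n * T) + r = r + (q * n) * T by ring, Nat.add_mul_div_right _ _ hT,
      Nat.add_mul_mod_self_right]

-- decoding is invariant under adding multiples of the grid's total
theorem dpairs_shift (g : List (String × List Int)) (q r : Nat) :
    dpairs g (stridesL g) ((q * tot g + r : Nat) : Int)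
      = dpairs g (stridesL g) ((r : Nat) : Int) := by
  induction g generalizing q r with
  | nil => rfl
  | cons kv rest ih =>
    simp only [dpairs, stridesL, List.zip_cons_cons, List.map_cons] at *
    congr 1
    · congr 1
      simp only [PySem.Int.floordiv_natCast, PySem.Int.mod_natCast]
      rw [show tot (kv :: rest) = kv.2.length * tot rest from by
        simp [tot, List.map_cons, List.prod_cons]]
      rw [div_mod_shift]
    · rw [show q * tot (kv :: rest) + r = (q * kv.2.length) * tot rest + r from by
        simp [tot, List.map_cons, List.prod_cons]; ring]
      exact ih (q * kv.2.length) r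

-- splitting range(n*T) into n blocks of length T
theorem range_mul_flatMap (n T : Nat) :
    List.range (n * T)
      = (List.range n).flatMap (fun q => (List.range T).map (fun r => q * T + r)) := by
  induction n with
  | zero => simp
  | succ n ih =>
    rw [Nat.succ_mul, List.range_add, ih, List.range_succ, List.flatMap_append]
    simp

-- a flatMap over a list is a flatMap over its index range
theorem flatMap_range_getElem {α β : Type} [Inhabited α] (l : List α) (g : α → List β) :
    (List.range l.length).flatMap (fun q => g (l.getD q default)) = l.flatMap g := by
  induction l with
  | nil => rfl
  | cons x xs ih =>
    rw [List.length_cons, List.range_succ_eq_map, List.flatMap_cons, List.flatMap_map]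
    simp only [List.getD_cons_zero, List.getD_cons_succ]
    rw [List.flatMap_cons, ih]

-- the decoded jobs, in index order, are exactly cart
theorem map_dpairs_range (g : List (String × List Int)) :
    (List.range (tot g)).map (fun k => dpairs g (stridesL g) ((k : Nat) : Int)) = cart g := by
  induction g with
  | nil => simp [tot, dpairs, cart, List.range_one]
  | cons kv rest ih =>
    have htot : tot (kv :: rest) = kv.2.length * tot rest := by simp [tot]
    rw [htot, range_mul_flatMap, List.map_flatMap, cart,
      ← flatMap_range_getElem kv.2 (fun v => (cart rest).map (fun t => (kv.1, v) :: t))]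
    refine List.flatMap_congr ?_
    intro q hq
    rw [List.mem_range] at hq
    rw [List.map_map]
    have hmap : ∀ r ∈ List.range (tot rest),
        dpairs (kv :: rest) (stridesL (kv :: rest)) (((q * tot rest + r : Nat)) : Int)
          = (kv.1, kv.2.getD q 0) :: dpairs rest (stridesL rest) ((r : Nat) : Int) := by
      intro r hr
      rw [List.mem_range] at hr
      have hT : 0 < tot rest := by omega
      simp only [dpairs, stridesL, List.zip_cons_cons, List.map_cons]
      congr 1
      · congr 1
        simp only [PySem.Int.floordiv_natCast, PySem.Int.mod_natCast, PySem.List.pyGetD_natCast]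
        congr 2
        rw [mul_comm, Nat.mul_add_div hT, Nat.div_eq_of_lt hr, Nat.add_zero,
          Nat.mod_eq_of_lt hq]
      · exact dpairs_shift rest q r
    calc (List.range (tot rest)).map
          (fun r => (fun k => dpairs (kv :: rest) (stridesL (kv :: rest)) ((k : Nat) : Int)) (q * tot rest + r))
        = (List.range (tot rest)).map
            (fun r => (kv.1, kv.2.getD q 0) :: dpairs rest (stridesL rest) ((r : Nat) : Int)) :=
          List.map_congr_left hmap
      _ = ((List.range (tot rest)).map (fun r => dpairs rest (stridesL rest) ((r : Nat) : Int))).map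
            (fun t => (kv.1, kv.2.getD q 0) :: t) := by rw [List.map_map]; rfl
      _ = (cart rest).map (fun t => (kv.1, kv.2.getD q default) :: t) := by rw [ih]; rfl

-- per-grid: B's body equals cart
theorem b_grid_eq_cart (grid : List (String × List Int)) (h : (grid.map Prod.fst).Nodup) :
    (PySem.List.pyRange 0 ((tot grid : Nat) : Int) 1).map (fun i =>
        (PySem.Dict.ofList (dpairs grid (stridesL grid) i)).items)
      = cart grid := by
  rw [PySem.List.pyRange_one]
  simp only [Int.sub_zero, Int.toNat_natCast, List.map_map, Function.comp_def, Int.zero_add]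
  have : (List.range (tot grid)).map
      (fun k => (PySem.Dict.ofList (dpairs grid (stridesL grid) ((k : Nat) : Int))).items)
      = ((List.range (tot grid)).map (fun k => dpairs grid (stridesL grid) ((k : Nat) : Int))).map
          (fun pairs => (PySem.Dict.ofList pairs).items) := by rw [List.map_map]; rfl
  rw [this, map_dpairs_range]
  conv_rhs => rw [← List.map_id (cart grid)]
  refine List.map_congr_left ?_
  intro pairs hp
  simpa using ofList_items_of_nodup pairs (by rw [mem_cart_fst hp]; exact h)

-- ===== VERDICT (by name: the statement is the Claim_ definition above) =====
theorem construct_jobs_spec : Claim_equal_construct_jobs := by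
  intro grids hdom hpre
  unfold Spec_construct_jobs construct_jobs construct_jobs_alt
  clear hdom
  induction grids using List.reverseRecOn with
  | nil => rfl
  | append_singleton gs g ih =>
    have hg : (g.map Prod.fst).Nodup := hpre g (by simp)
    have ihs := ih (fun grid hm => hpre grid (List.mem_append_left _ hm))
    simp only [List.foldl_append, List.foldl_cons, List.foldl_nil]
    rw [a_grid_eq_cart g hg, stride_fold, List.reverse_reverse]
    rw [show (fun i => (PySem.Dict.ofList ((g.zip (stridesL g)).map (fun x =>
          (x.1.1, PySem.List.pyGetD x.1.2
            (PySem.Int.mod (PySem.Int.floordiv i x.2) (x.1.2.length : Int)) 0)))).items)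
        = (fun i => (PySem.Dict.ofList (dpairs g (stridesL g) i)).items) from rfl]
    rw [b_grid_eq_cart g hg, ihs]
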